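-- pv_equiv track=rewrite | github.com/cyl0424/algorithm_study | 프로그래머스/1/155652. 둘만의 암호/둘만의 암호.py | solution
-- ===== SOURCE A (Python) =====
-- from string import ascii_lowercase
--
-- def solution(s, skip, index):
--     result = ''
--
--     alpha = set(ascii_lowercase) - set(skip)
--     alpha = sorted(alpha)
--     l = len(alpha)
--
--     alpha_num = {a:idx for idx, a in enumerate(alpha)}
--
--     for c in s:
--         result += alpha[(alpha_num[c] + index) % l]
--
--     return result
-- ===== SOURCE B (Python) =====
-- from string import ascii_lowercase
--
-- def solution(s, skip, index):
--     # Rank/select over the alphabet: no reduced-alphabet list, no sort, no dict.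
--     # rank(c) = alphabet position of c minus the skipped letters before it;
--     # select(j) = j-th kept letter, found by a counting scan.
--     l = sum(1 for a in ascii_lowercase if a not in skip)
--     out = []
--     for c in s:
--         r = ascii_lowercase.index(c) - sum(1 for a in ascii_lowercase if a < c and a in skip)
--         j = (r + index) % l
--         for a in ascii_lowercase:
--             if a not in skip:
--                 if j == 0:
--                     out.append(a)
--                     break
--                 j -= 1
--     return ''.join(out)
-- ===== Notes on version B (the rewrite author's own statement) =====
-- stated objective: alternative
-- what changed: B replaces A's sorted-set alphabet plus enumerate-dict by a rank/select scheme: it never materialises the reduced alphabet or any dict, computing each character's rank arithmetically (alphabet position minus skipped letters before it) and selecting the shifted output letter by a counting scan with a countdown.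
import Mathlib
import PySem

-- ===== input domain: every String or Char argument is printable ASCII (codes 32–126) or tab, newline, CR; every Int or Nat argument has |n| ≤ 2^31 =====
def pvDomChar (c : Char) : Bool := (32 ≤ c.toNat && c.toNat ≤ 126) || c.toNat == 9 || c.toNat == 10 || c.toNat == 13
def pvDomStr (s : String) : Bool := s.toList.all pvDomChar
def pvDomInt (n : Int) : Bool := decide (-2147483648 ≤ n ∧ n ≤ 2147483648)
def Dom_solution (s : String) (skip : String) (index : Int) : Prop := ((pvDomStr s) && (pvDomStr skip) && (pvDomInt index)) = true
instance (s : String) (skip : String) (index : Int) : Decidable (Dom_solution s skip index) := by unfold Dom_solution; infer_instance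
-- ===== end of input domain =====

-- B replaces A's sorted set + index dict by rank/select counting scans over ascii_lowercase
-- (no reduced-alphabet list, no dict); equal return values on Pre_ (alternative decomposition, no speed claim).

-- ===== PORT A =====
def asciiLowercase : List Char := "abcdefghijklmnopqrstuvwxyz".toList

def solution (s : String) (skip : String) (index : Int) : String :=
  -- alpha = sorted(set(ascii_lowercase) - set(skip))
  let alpha : List Char :=
    PySem.List.sorted
      (PySem.Set.diff (PySem.Set.ofList asciiLowercase) (PySem.Set.ofList skip.toList))
      (fun x => x) false
  let l : Int := alpha.length
  -- alpha_num = {a: idx for idx, a in enumerate(alpha)}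
  let alphaNum : PySem.Dict Char Int :=
    (PySem.List.enumerate alpha).foldl (fun d p => d.insert p.2 p.1) PySem.Dict.empty
  -- for c in s: result += alpha[(alpha_num[c] + index) % l]   (KeyError/ZeroDivisionError excluded by Pre_)
  String.ofList (s.toList.foldl (fun result c =>
    result ++ [PySem.List.pyGetD alpha (PySem.Int.mod (alphaNum.getD c 0 + index) l) ' ']) [])

-- ===== PORT B =====
-- inner 'for a in ascii_lowercase: if a not in skip: if j == 0: append(a); break else j -= 1'
def bSelect (skipL : List Char) (j : Int) : List Char → List Char
  | [] => []
  | a :: rest =>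
      if !skipL.contains a then
        if j == 0 then [a] else bSelect skipL (j - 1) rest
      else bSelect skipL j rest

def solution_alt (s : String) (skip : String) (index : Int) : String :=
  let skipL := skip.toList
  -- l = sum(1 for a in ascii_lowercase if a not in skip)
  let l : Int := (asciiLowercase.countP (fun a => !skipL.contains a) : Int)
  String.ofList (s.toList.foldl (fun out c =>
    -- r = ascii_lowercase.index(c) - sum(1 for a in ascii_lowercase if a < c and a in skip)
    -- (str.index raises ValueError when c is not a lowercase letter: excluded by Pre_)
    let r : Int := (((PySem.List.index? asciiLowercase c).getD 0 : Nat) : Int)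
        - (asciiLowercase.countP (fun a => a < c && skipL.contains a) : Int)
    let j := PySem.Int.mod (r + index) l
    out ++ bSelect skipL j asciiLowercase) [])

-- ===== PRECONDITION & SPEC =====
-- Pre_ admits exactly the inputs where A returns: every char of s is a lowercase ascii letter not in skip
-- (otherwise A raises KeyError on alpha_num[c], or ZeroDivisionError when the reduced alphabet is empty).
def Pre_solution (s : String) (skip : String) (index : Int) : Prop :=
  s.toList.all (fun c => asciiLowercase.contains c && !(skip.toList.contains c)) = true
instance (s : String) (skip : String) (index : Int) : Decidable (Pre_solution s skip index) := by unfold Pre_solution; infer_instance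

def pvWitness_solution : String × String × Int := ("aukks", "wbqd", 5)

def Spec_solution (s : String) (skip : String) (index : Int) (out : String) : Prop := out = solution_alt s skip index
instance (s : String) (skip : String) (index : Int) (out : String) : Decidable (Spec_solution s skip index out) := by unfold Spec_solution; infer_instance

-- ===== CLAIM (what is proved, stated in full; the proofs are below) =====
def Claim_equal_solution : Prop := ∀ (s : String) (skip : String) (index : Int), Dom_solution s skip index → Pre_solution s skip index → Spec_solution s skip index (solution s skip index)

-- ===== LEMMAS AND PROOFS =====
theorem alpha_eq (skip : String) :
    PySem.List.sorted
      (PySem.Set.diff (PySem.Set.ofList asciiLowercase) (PySem.Set.ofList skip.toList))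
      (fun x => x) false
      = asciiLowercase.filter (fun c => !(skip.toList.contains c)) := by
  apply PySem.List.sorted_eq_of_perm_of_pairwise_lt
  · rw [List.perm_ext_iff_of_nodup (List.Nodup.filter _ (by decide))
        (PySem.Set.nodup_diff _ _ (PySem.Set.nodup_ofList _))]
    intro a
    simp [List.mem_filter, PySem.Set.mem_diff, PySem.Set.mem_ofList]
  · exact List.Pairwise.filter _ (by decide)

theorem alphaNum_getD (alpha : List Char) (hnd : alpha.Nodup) (k : Nat) (hk : k < alpha.length) :
    ((PySem.List.enumerate alpha).foldl (fun d p => d.insert p.2 p.1) PySem.Dict.empty).getD alpha[k] 0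
      = (k : Int) := by
  have hitems := PySem.Dict.items_foldl_insert_fresh (PySem.List.enumerate alpha)
      (fun p => p.2) (fun p => p.1) PySem.Dict.empty (by simp)
      (by rw [PySem.List.map_snd_enumerate]; exact hnd)
  have hkeys : ((PySem.List.enumerate alpha).foldl (fun d p => d.insert p.2 p.1) PySem.Dict.empty).keys.Nodup :=
    PySem.Dict.nodup_keys_foldl_insert_key _ _ _ _ (by simp)
  apply PySem.Dict.getD_of_mem_items _ ?_ hkeys
  rw [hitems]
  simp only [List.mem_append, List.mem_map]
  right
  exact ⟨((k : Int), alpha[k]), (PySem.List.mem_enumerate_iff _ _ _).mpr ⟨k, hk, by simp⟩, rfl⟩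

-- select: the scan-with-countdown returns the j-th kept letter (as a ≤1-element list)
theorem bSelect_eq (skipL : List Char) (L : List Char) :
    ∀ (j : Int), 0 ≤ j →
      bSelect skipL j L = ((L.filter (fun a => !skipL.contains a))[j.toNat]?).toList := by
  induction L with
  | nil => intro j _; simp [bSelect]
  | cons a rest ih =>
    intro j hj
    by_cases hka : (!skipL.contains a) = true
    · have hna : a ∉ skipL := by simpa using hka
      rw [bSelect, if_pos hka]
      by_cases hz : j = 0
      · subst hz; simp [hna]
      · rw [if_neg (show ¬((j == 0) = true) by simp [hz]), ih (j - 1) (by omega)]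
        have hfa : (a :: rest).filter (fun a => !skipL.contains a)
            = a :: rest.filter (fun a => !skipL.contains a) := by
          simp [hna]
        have ht : j.toNat = (j - 1).toNat + 1 := by omega
        rw [hfa, ht, List.getElem?_cons_succ]
    · have hia : a ∈ skipL := by simpa using hka
      rw [bSelect, if_neg hka, ih j hj]
      simp [hia]

-- rank in a strictly sorted list: counting smaller elements recovers the index
theorem countP_lt_of_sorted (F : List Char) (hs : F.Pairwise (· < ·)) :
    ∀ (k : Nat), k < F.length → F.countP (fun a => a < F[k]!) = k := by
  induction F with
  | nil => intro k hk; simp at hk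
  | cons x xs ih =>
    intro k hk
    rcases List.pairwise_cons.mp hs with ⟨hx, hxs⟩
    cases k with
    | zero =>
      simp only [List.getElem!_cons_zero, List.countP_cons]
      rw [List.countP_eq_zero.mpr (by intro a ha; simp; exact le_of_lt (hx a ha))]
      simp
    | succ k =>
      have hk' : k < xs.length := by simpa using hk
      have hget : (x :: xs)[k + 1]! = xs[k]! := by
        rw [List.getElem!_eq_getElem?_getD, List.getElem!_eq_getElem?_getD, List.getElem?_cons_succ]
      have hxlt : x < xs[k]! := by
        rw [List.getElem!_eq_getElem?_getD, List.getElem?_eq_getElem hk']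
        exact hx _ (List.getElem_mem hk')
      rw [hget, List.countP_cons_of_pos (by simpa using hxlt), ih hxs k hk']

theorem flatMap_eq_map_of {α β : Type} (l : List α) (g : α → List β) (f : α → β)
    (h : ∀ c ∈ l, g c = [f c]) : l.flatMap g = l.map f := by
  induction l with
  | nil => rfl
  | cons a t ih =>
    simp only [List.flatMap_cons, List.map_cons, h a (by simp),
      ih (fun c hc => h c (by simp [hc])), List.singleton_append]

theorem index?_getElem_nodup (L : List Char) (h : L.Nodup) :
    ∀ (k : Nat) (hk : k < L.length), PySem.List.index? L L[k] = some k := by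
  induction L with
  | nil => intro k hk; simp at hk
  | cons x xs ih =>
    intro k hk
    rcases List.nodup_cons.mp h with ⟨hx, hxs⟩
    cases k with
    | zero => exact PySem.List.index?_cons_self _ _
    | succ k =>
      have hk' : k < xs.length := by simpa using hk
      have hne : x ≠ (x :: xs)[k + 1] := by
        simp only [List.getElem_cons_succ]
        intro hcon
        exact hx (hcon ▸ List.getElem_mem hk')
      rw [PySem.List.index?_cons_of_ne _ hne]
      simp only [List.getElem_cons_succ]
      rw [ih hxs k hk']
      rfl

theorem countP_split (q p : Char → Bool) (L : List Char) :
    L.countP p = L.countP (fun a => p a && q a) + L.countP (fun a => p a && !q a) := by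
  induction L with
  | nil => rfl
  | cons x xs ih =>
    simp only [List.countP_cons, ih]
    by_cases hp : p x <;> by_cases hq : q x <;> simp [hp, hq] <;> omega

-- ===== VERDICT (by name: the statement is the Claim_ definition above) =====
theorem solution_spec : Claim_equal_solution := by
  intro s skip index _ hpre
  unfold Spec_solution
  simp only [solution, solution_alt, alpha_eq]
  rw [PySem.List.foldl_append_singleton_eq_map, PySem.List.foldl_append_eq_flatMap]
  simp only [List.nil_append]
  congr 1
  symm
  apply flatMap_eq_map_of
  intro c hc
  have h := List.all_eq_true.mp hpre c hc
  simp only [Bool.and_eq_true] at h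
  have hnd : (asciiLowercase.filter (fun a => !(skip.toList.contains a))).Nodup :=
    List.Nodup.filter _ (by decide)
  have hsorted : (asciiLowercase.filter (fun a => !(skip.toList.contains a))).Pairwise (· < ·) :=
    List.Pairwise.filter _ (by decide)
  have hc' : c ∈ asciiLowercase.filter (fun a => !(skip.toList.contains a)) :=
    List.mem_filter.mpr ⟨by simpa using h.1, h.2⟩
  obtain ⟨k, hk, hck⟩ := List.mem_iff_getElem.mp hc'
  have hl : asciiLowercase.countP (fun a => !(skip.toList.contains a))
      = (asciiLowercase.filter (fun a => !(skip.toList.contains a))).length :=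
    List.countP_eq_length_filter
  have hr : asciiLowercase.countP (fun a => a < c && !(skip.toList.contains a)) = k := by
    rw [show (fun a => decide (a < c) && !(skip.toList.contains a))
          = (fun a => decide (a < c) && (fun a => !(skip.toList.contains a)) a) from rfl,
        ← List.countP_filter]
    have := countP_lt_of_sorted _ hsorted k hk
    rwa [List.getElem!_eq_getElem?_getD, List.getElem?_eq_getElem hk, Option.getD_some, hck] at this
  obtain ⟨i, hi, hci⟩ := List.mem_iff_getElem.mp (by simpa using h.1 : c ∈ asciiLowercase)
  have hidx : PySem.List.index? asciiLowercase c = some i := by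
    rw [← hci]; exact index?_getElem_nodup asciiLowercase (by decide) i hi
  have hiv : asciiLowercase.countP (fun a => a < c) = i := by
    have := countP_lt_of_sorted asciiLowercase (by decide) i hi
    rwa [List.getElem!_eq_getElem?_getD, List.getElem?_eq_getElem hi, Option.getD_some, hci] at this
  have hsplit := countP_split (fun a => skip.toList.contains a) (fun a => decide (a < c)) asciiLowercase
  rw [hiv] at hsplit
  have hrr : ((((PySem.List.index? asciiLowercase c).getD 0 : Nat) : Int)
      - (asciiLowercase.countP (fun a => a < c && skip.toList.contains a) : Int)) = (k : Int) := by
    rw [hidx]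
    have h2 : asciiLowercase.countP (fun a => decide (a < c) && !(skip.toList.contains a)) = k := hr
    simp only [Option.getD_some]
    omega
  rw [← hck, alphaNum_getD _ hnd k hk, hck, hl, hrr]
  have hlen : 0 < (asciiLowercase.filter (fun a => !(skip.toList.contains a))).length :=
    List.length_pos_of_mem hc'
  have hlenI : (0 : Int) < ((asciiLowercase.filter (fun a => !(skip.toList.contains a))).length : Int) := by
    exact_mod_cast hlen
  set j := PySem.Int.mod ((k : Int) + index)
      ((asciiLowercase.filter (fun a => !(skip.toList.contains a))).length : Int) with hj
  have hj0 : 0 ≤ j := PySem.Int.mod_nonneg _ hlenI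
  have hjl : j < _ := PySem.Int.mod_lt ((k : Int) + index) hlenI
  have hjn : j.toNat < (asciiLowercase.filter (fun a => !(skip.toList.contains a))).length := by omega
  rw [bSelect_eq skip.toList asciiLowercase j hj0,
      PySem.List.pyGetD_eq_getElem _ _ hj0 (by simpa using hjl)]
  simp
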